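-- pv_equiv track=rewrite | github.com/md-ibu786/AURA-PROTO | services/entity_aware_chunker.py | _filter_entities_for_text
-- ===== SOURCE A (Python) =====
-- from typing import Any, Dict, List, Tuple
--
-- def _filter_entities_for_text(
--     chunk_text: str, entity_map: Dict[str, str], primary_entity: str
-- ) -> Tuple[List[str], List[str], str]:
--     text_lower = chunk_text.lower()
--     filtered_names = [
--         name for name in entity_map.keys() if name and name.lower() in text_lower
--     ]
--     filtered_ids = [entity_map[name] for name in filtered_names]
--
--     if primary_entity and primary_entity not in filtered_ids:
--         primary_entity = filtered_ids[0] if filtered_ids else ""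
--
--     return filtered_ids, filtered_names, primary_entity
-- ===== SOURCE B (Python) =====
-- # B: length-bucketed sliding-window multi-pattern match: collect the distinct
-- # pattern lengths, slide a window of each length over the lowered text checking
-- # windows against a per-length pattern set, then emit names/ids in one pass.
-- def _filter_entities_for_text(chunk_text, entity_map, primary_entity):
--     text = chunk_text.lower()
--     lengths = {len(name) for name in entity_map if name}
--     matched = set()
--     for length in lengths:
--         patterns = {n.lower() for n in entity_map if n and len(n) == length}
--         for i in range(len(text) - length + 1):
--             window = text[i:i + length]
--             if window in patterns:
--                 matched.add(window)
--     filtered_ids, filtered_names = [], []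
--     for name, entity_id in entity_map.items():
--         if name and name.lower() in matched:
--             filtered_names.append(name)
--             filtered_ids.append(entity_id)
--     if primary_entity and primary_entity not in filtered_ids:
--         primary_entity = filtered_ids[0] if filtered_ids else ""
--     return filtered_ids, filtered_names, primary_entity
-- ===== Notes on version B (the rewrite author's own statement) =====
-- stated objective: faster
-- what changed: A tests each entity name separately with a substring search over the whole lowered text; B groups patterns by length into hash sets and slides one window per distinct length across the text, collecting matched patterns in a set, then emits names/ids in a single pass over the items.
import Mathlib
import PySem

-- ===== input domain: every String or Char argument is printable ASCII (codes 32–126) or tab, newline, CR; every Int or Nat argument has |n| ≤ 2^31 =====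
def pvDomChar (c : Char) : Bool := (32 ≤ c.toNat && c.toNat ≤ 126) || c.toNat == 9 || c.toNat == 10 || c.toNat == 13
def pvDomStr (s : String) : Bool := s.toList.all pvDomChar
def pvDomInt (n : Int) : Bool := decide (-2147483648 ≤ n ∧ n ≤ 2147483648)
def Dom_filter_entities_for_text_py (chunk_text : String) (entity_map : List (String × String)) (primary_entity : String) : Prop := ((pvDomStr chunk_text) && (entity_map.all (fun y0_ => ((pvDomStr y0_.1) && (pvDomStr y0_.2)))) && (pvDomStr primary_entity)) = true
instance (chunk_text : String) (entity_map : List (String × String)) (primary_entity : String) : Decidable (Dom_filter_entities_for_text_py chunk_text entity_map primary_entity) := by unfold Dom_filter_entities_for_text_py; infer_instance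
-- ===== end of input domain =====

-- B replaces A's per-name naive substring scans by a length-bucketed sliding-window
-- multi-pattern match (one window scan per distinct pattern length, pattern sets hashed).


-- ===== PORT A =====
-- literal transliteration of A: lower the text, keep the dict keys whose lowering is a
-- substring, look each kept name up for its id, then fix up primary_entity.
def filter_entities_for_text_py (chunk_text : String) (entity_map : List (String × String)) (primary_entity : String) : List String × List String × String :=
  let d := PySem.Dict.ofList entity_map
  let text_lower := PySem.Str.lower chunk_text
  let filtered_names := d.keys.filter (fun name => decide (name ≠ "") && PySem.Str.isIn (PySem.Str.lower name) text_lower)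
  let filtered_ids := filtered_names.map (fun name => d.getD name "")   -- entity_map[name]; name is a key, so no KeyError
  let primary := if decide (primary_entity ≠ "") && !(filtered_ids.contains primary_entity)
    then (match filtered_ids with | [] => "" | x :: _ => x) else primary_entity
  (filtered_ids, filtered_names, primary)

-- ===== PORT B =====
-- inner loop of B: slide a window of the given length over the text, collecting windows
-- that belong to the pattern set into `matched`.
def pvWindowScan (text : List Char) (length : Nat) (patterns : PySem.Set (List Char)) (matched : PySem.Set (List Char)) : PySem.Set (List Char) :=
  (PySem.List.pyRange 0 ((text.length : Int) - (length : Int) + 1) 1).foldl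
    (fun matched i =>
      let window := PySem.List.slice text (some i) (some (i + (length : Int)))
      if PySem.Set.contains patterns window then PySem.Set.add matched window else matched)
    matched

-- literal transliteration of B (Source B): distinct lengths, per-length pattern set + window
-- scan, then one pass over the items building ids and names together.
def filter_entities_for_text_py_alt (chunk_text : String) (entity_map : List (String × String)) (primary_entity : String) : List String × List String × String :=
  let d := PySem.Dict.ofList entity_map
  let text := PySem.Chars.lower chunk_text.toList
  let lengths : PySem.Set Nat := PySem.Set.ofList ((d.keys.filter (fun n => decide (n ≠ ""))).map (fun n => n.toList.length))
  let matched : PySem.Set (List Char) :=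
    lengths.foldl (fun matched length =>
      let patterns : PySem.Set (List Char) := PySem.Set.ofList
        ((d.keys.filter (fun n => decide (n ≠ "") && decide (n.toList.length = length))).map (fun n => PySem.Chars.lower n.toList))
      pvWindowScan text length patterns matched) PySem.Set.empty
  let p := d.items.foldl (fun (acc : List String × List String) kv =>
      if decide (kv.1 ≠ "") && PySem.Set.contains matched (PySem.Chars.lower kv.1.toList)
      then (acc.1 ++ [kv.2], acc.2 ++ [kv.1]) else acc) ([], [])
  let filtered_ids := p.1
  let filtered_names := p.2
  let primary := if decide (primary_entity ≠ "") && !(filtered_ids.contains primary_entity)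
    then (match filtered_ids with | [] => "" | x :: _ => x) else primary_entity
  (filtered_ids, filtered_names, primary)

-- ===== PRECONDITION & SPEC =====
def Spec_filter_entities_for_text_py (chunk_text : String) (entity_map : List (String × String)) (primary_entity : String) (out : List String × List String × String) : Prop := out = filter_entities_for_text_py_alt chunk_text entity_map primary_entity
instance (chunk_text : String) (entity_map : List (String × String)) (primary_entity : String) (out : List String × List String × String) : Decidable (Spec_filter_entities_for_text_py chunk_text entity_map primary_entity out) := by unfold Spec_filter_entities_for_text_py; infer_instance

-- ===== CLAIM (what is proved, stated in full; the proofs are below) =====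
def Claim_equal_filter_entities_for_text_py : Prop := ∀ (chunk_text : String) (entity_map : List (String × String)) (primary_entity : String), Dom_filter_entities_for_text_py chunk_text entity_map primary_entity → Spec_filter_entities_for_text_py chunk_text entity_map primary_entity (filter_entities_for_text_py chunk_text entity_map primary_entity)

-- ===== LEMMAS AND PROOFS =====

-- membership after one window scan
lemma mem_pvWindowScan (text : List Char) (L : Nat) (pats m : PySem.Set (List Char)) (w : List Char) :
    w ∈ pvWindowScan text L pats m ↔ w ∈ m ∨ (w ∈ pats ∧
      ∃ i : Int, i ∈ PySem.List.pyRange 0 ((text.length : Int) - (L : Int) + 1) 1 ∧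
        PySem.List.slice text (some i) (some (i + (L : Int))) = w) := by
  unfold pvWindowScan
  generalize PySem.List.pyRange 0 ((text.length : Int) - (L : Int) + 1) 1 = is
  induction is generalizing m with
  | nil => simp
  | cons i is ih =>
    simp only [List.foldl_cons]
    by_cases hc : PySem.Set.contains pats (PySem.List.slice text (some i) (some (i + (L : Int)))) = true
    · simp only [hc, if_pos]
      rw [ih]
      simp only [PySem.Set.mem_add, List.mem_cons]
      constructor
      · rintro ((hm | hw) | h)
        · exact Or.inl hm
        · exact Or.inr ⟨hw ▸ (PySem.Set.contains_iff _ _).mp hc, i, Or.inl rfl, hw.symm⟩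
        · exact Or.inr ⟨h.1, h.2.choose, Or.inr h.2.choose_spec.1, h.2.choose_spec.2⟩
      · rintro (hm | ⟨hp, j, (rfl | hj), hs⟩)
        · exact Or.inl (Or.inl hm)
        · exact Or.inl (Or.inr hs.symm)
        · exact Or.inr ⟨hp, j, hj, hs⟩
    · simp only [Bool.not_eq_true] at hc
      simp only [hc, Bool.false_eq_true, if_false]
      rw [ih]
      simp only [List.mem_cons]
      constructor
      · rintro (hm | h)
        · exact Or.inl hm
        · exact Or.inr ⟨h.1, h.2.choose, Or.inr h.2.choose_spec.1, h.2.choose_spec.2⟩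
      · rintro (hm | ⟨hp, j, (rfl | hj), hs⟩)
        · exact Or.inl hm
        · exfalso
          rw [hs] at hc
          have := (PySem.Set.contains_iff _ _).mpr hp
          rw [hc] at this
          exact Bool.false_ne_true this
        · exact Or.inr ⟨hp, j, hj, hs⟩

-- a window occurrence of a length-|w| pattern is exactly an infix occurrence
lemma occurrence_iff_infix (text w : List Char) (L : Nat) (hw : w.length = L) :
    (∃ i : Int, i ∈ PySem.List.pyRange 0 ((text.length : Int) - (L : Int) + 1) 1 ∧
      PySem.List.slice text (some i) (some (i + (L : Int))) = w) ↔ w <:+: text := by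
  constructor
  · rintro ⟨i, hi, hs⟩
    rw [PySem.List.mem_pyRange_one] at hi
    rw [PySem.List.slice_toNat _ hi.1 (by omega)] at hs
    have : (i + (L : Int)).toNat - i.toNat = L := by omega
    rw [this] at hs
    exact hs ▸ ((List.take_prefix _ _).isInfix.trans (text.drop_suffix i.toNat).isInfix)
  · rintro ⟨pre, suf, rfl⟩
    refine ⟨(pre.length : Int), ?_, ?_⟩
    · rw [PySem.List.mem_pyRange_one]
      constructor
      · positivity
      · have := List.length_append (as := pre ++ w) (bs := suf)
        simp only [List.length_append] at *
        omega
    · have : ((pre.length : Int) + (L : Int)) = ((pre.length + L : Nat) : Int) := by push_cast; ring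
      rw [this, PySem.List.slice_natCast]
      have h1 : (pre ++ w ++ suf).drop pre.length = w ++ suf := by
        rw [List.append_assoc]; exact List.drop_left
      rw [h1]
      have : pre.length + L - pre.length = L := by omega
      rw [this, ← hw]
      exact List.take_left


-- membership in one per-length pattern set
lemma mem_pvPats (names : List String) (L : Nat) (w : List Char) :
    w ∈ (PySem.Set.ofList ((names.filter (fun n => decide (n ≠ "") && decide (n.toList.length = L))).map (fun n => PySem.Chars.lower n.toList)) : List (List Char)) ↔
      ∃ n ∈ names, n ≠ "" ∧ n.toList.length = L ∧ PySem.Chars.lower n.toList = w := by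
  rw [PySem.Set.mem_ofList]
  simp [List.mem_map, List.mem_filter]
  tauto

lemma length_lower (s : List Char) : (PySem.Chars.lower s).length = s.length := by
  simp [PySem.Chars.lower]

lemma length_of_mem_pvPats (names : List String) (L : Nat) (w : List Char)
    (h : w ∈ (PySem.Set.ofList ((names.filter (fun n => decide (n ≠ "") && decide (n.toList.length = L))).map (fun n => PySem.Chars.lower n.toList)) : List (List Char))) :
    w.length = L := by
  obtain ⟨n, _, _, hL, rfl⟩ := (mem_pvPats names L w).mp h
  rw [length_lower]; exact hL

-- membership after the whole per-length scan loop
lemma mem_matched (text : List Char) (names : List String) (ls : List Nat) (m : PySem.Set (List Char)) (w : List Char) :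
    w ∈ ls.foldl (fun matched len =>
        pvWindowScan text len (PySem.Set.ofList ((names.filter (fun n => decide (n ≠ "") && decide (n.toList.length = len))).map (fun n => PySem.Chars.lower n.toList))) matched) m ↔
      w ∈ m ∨ ∃ L ∈ ls,
        w ∈ (PySem.Set.ofList ((names.filter (fun n => decide (n ≠ "") && decide (n.toList.length = L))).map (fun n => PySem.Chars.lower n.toList)) : List (List Char)) ∧
        ∃ i : Int, i ∈ PySem.List.pyRange 0 ((text.length : Int) - (L : Int) + 1) 1 ∧
          PySem.List.slice text (some i) (some (i + (L : Int))) = w := by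
  induction ls generalizing m with
  | nil => simp
  | cons L ls ih =>
    simp only [List.foldl_cons, ih, mem_pvWindowScan, List.mem_cons]
    constructor
    · rintro ((hm | h) | ⟨L', hL', h'⟩)
      · exact Or.inl hm
      · exact Or.inr ⟨L, Or.inl rfl, h.1, h.2⟩
      · exact Or.inr ⟨L', Or.inr hL', h'⟩
    · rintro (hm | ⟨L', (rfl | hL'), h'⟩)
      · exact Or.inl (Or.inl hm)
      · exact Or.inl (Or.inr h')
      · exact Or.inr ⟨L', hL', h'⟩

-- the per-name equivalence: B's matched-set test agrees with A's substring test
lemma lower_mem_matched_iff (text : List Char) (names : List String) (name : String)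
    (hn : name ∈ names) (hne : name ≠ "") :
    PySem.Chars.lower name.toList ∈
      ((PySem.Set.ofList ((names.filter (fun n => decide (n ≠ ""))).map (fun n => n.toList.length)) : List Nat).foldl
        (fun matched len =>
          pvWindowScan text len (PySem.Set.ofList ((names.filter (fun n => decide (n ≠ "") && decide (n.toList.length = len))).map (fun n => PySem.Chars.lower n.toList))) matched)
        PySem.Set.empty) ↔
      PySem.Chars.isIn (PySem.Chars.lower name.toList) text = true := by
  rw [mem_matched, PySem.Chars.isIn_iff_infix]
  constructor
  · rintro (hm | ⟨L, _, hp, hocc⟩)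
    · simp [PySem.Set.empty] at hm
    · exact (occurrence_iff_infix text _ L (length_of_mem_pvPats names L _ hp)).mp hocc
  · intro hinf
    refine Or.inr ⟨name.toList.length, ?_, ?_, ?_⟩
    · rw [PySem.Set.mem_ofList]
      exact List.mem_map.mpr ⟨name, List.mem_filter.mpr ⟨hn, by simp [hne]⟩, rfl⟩
    · exact (mem_pvPats names _ _).mpr ⟨name, hn, hne, rfl, rfl⟩
    · exact (occurrence_iff_infix text _ _ (length_lower name.toList)).mpr hinf

-- B's single pass over the items, as filter-and-project
lemma foldl_pair (l : List (String × String)) (c : String × String → Bool) (a b : List String) :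
    l.foldl (fun (acc : List String × List String) kv =>
        if c kv then (acc.1 ++ [kv.2], acc.2 ++ [kv.1]) else acc) (a, b) =
      (a ++ (l.filter c).map (·.2), b ++ (l.filter c).map (·.1)) := by
  induction l generalizing a b with
  | nil => simp
  | cons kv l ih =>
    simp only [List.foldl_cons, List.filter_cons]
    by_cases hc : c kv = true
    · simp only [hc, if_pos, ih, List.map_cons]
      simp
    · simp only [Bool.not_eq_true] at hc
      simp [hc, ih]
-- ===== VERDICT (by name: the statement is the Claim_ definition above) =====
theorem filter_entities_for_text_py_spec : Claim_equal_filter_entities_for_text_py := by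
  intro chunk_text entity_map primary_entity _
  unfold Spec_filter_entities_for_text_py
  simp only [filter_entities_for_text_py, filter_entities_for_text_py_alt, PySem.Str.isIn_eq,
    PySem.Str.toList_lower, foldl_pair, List.nil_append]
  have hnames : (PySem.Dict.ofList entity_map).keys.filter
      (fun name => decide (name ≠ "") && PySem.Chars.isIn (PySem.Chars.lower name.toList) (PySem.Chars.lower chunk_text.toList)) =
      ((PySem.Dict.ofList entity_map).items.filter
        (fun kv => decide (kv.1 ≠ "") && PySem.Set.contains
          (((PySem.Set.ofList (((PySem.Dict.ofList entity_map).keys.filter (fun n => decide (n ≠ ""))).map (fun n => n.toList.length)) : List Nat).foldl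
            (fun matched len =>
              pvWindowScan (PySem.Chars.lower chunk_text.toList) len
                (PySem.Set.ofList ((((PySem.Dict.ofList entity_map).keys.filter (fun n => decide (n ≠ "") && decide (n.toList.length = len))).map (fun n => PySem.Chars.lower n.toList)))) matched)
            PySem.Set.empty))
          (PySem.Chars.lower kv.1.toList))).map (·.1) := by
    have hk : (PySem.Dict.ofList entity_map).keys = (PySem.Dict.ofList entity_map).items.map (·.1) := rfl
    conv_lhs => rw [hk]
    rw [List.filter_map]
    congr 1
    apply List.filter_congr
    intro kv hkv
    by_cases h1 : kv.1 = ""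
    · simp [Function.comp, h1]
    · simp only [Function.comp, h1, ne_eq, not_false_iff, decide_true, Bool.true_and]
      apply Bool.coe_iff_coe.mp
      rw [PySem.Set.contains_iff]
      exact (lower_mem_matched_iff (PySem.Chars.lower chunk_text.toList) (PySem.Dict.ofList entity_map).keys kv.1
        (PySem.Dict.mem_keys_of_mem_items _ hkv) h1).symm
  rw [hnames, List.map_map]
  have hids : ∀ kv ∈ ((PySem.Dict.ofList entity_map).items.filter
      (fun kv => decide (kv.1 ≠ "") && PySem.Set.contains
        (((PySem.Set.ofList (((PySem.Dict.ofList entity_map).keys.filter (fun n => decide (n ≠ ""))).map (fun n => n.toList.length)) : List Nat).foldl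
          (fun matched len =>
            pvWindowScan (PySem.Chars.lower chunk_text.toList) len
              (PySem.Set.ofList ((((PySem.Dict.ofList entity_map).keys.filter (fun n => decide (n ≠ "") && decide (n.toList.length = len))).map (fun n => PySem.Chars.lower n.toList)))) matched)
          PySem.Set.empty))
        (PySem.Chars.lower kv.1.toList))),
      ((fun n => (PySem.Dict.ofList entity_map).getD n "") ∘ (·.1)) kv = kv.2 := by
    intro kv hkv
    exact PySem.Dict.getD_of_mem_items (PySem.Dict.ofList entity_map)
      (by exact List.mem_of_mem_filter hkv) (PySem.Dict.nodup_keys_ofList entity_map) ""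
  rw [List.map_congr_left hids]
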